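-- pv_equiv track=rewrite | github.com/can4ez/python_learn | kt2/task1.py | gen_paragrapths
-- ===== SOURCE A (Python) =====
-- def gen_paragrapths(items, n):
--     result = []
--     i = 0
--     c = 0
--
--     for s in items:
--
--         if c == 0:
--             result.append(s)
--         else:
--             result[i] += ' ' + s
--         c += 1
--
--         if c == n:
--             c = 0
--             i += 1
--
--     return result
-- ===== SOURCE B (Python) =====
-- def gen_paragrapths(items, n):
--     if n <= 0:
--         # A never resets its counter for non-positive n: everything becomes one paragraph
--         return [' '.join(items)] if items else []
--     return [' '.join(items[j:j + n]) for j in range(0, len(items), n)]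
-- ===== Notes on version B (the rewrite author's own statement) =====
-- stated objective: faster
-- what changed: Replaces A's per-word counter/accumulator loop (repeated string concatenation onto result[i], quadratic in paragraph length) with index-based chunking: ' '.join(items[j:j+n]) for j in range(0, len(items), n), keeping A's one-big-paragraph result for n <= 0.
import Mathlib
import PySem

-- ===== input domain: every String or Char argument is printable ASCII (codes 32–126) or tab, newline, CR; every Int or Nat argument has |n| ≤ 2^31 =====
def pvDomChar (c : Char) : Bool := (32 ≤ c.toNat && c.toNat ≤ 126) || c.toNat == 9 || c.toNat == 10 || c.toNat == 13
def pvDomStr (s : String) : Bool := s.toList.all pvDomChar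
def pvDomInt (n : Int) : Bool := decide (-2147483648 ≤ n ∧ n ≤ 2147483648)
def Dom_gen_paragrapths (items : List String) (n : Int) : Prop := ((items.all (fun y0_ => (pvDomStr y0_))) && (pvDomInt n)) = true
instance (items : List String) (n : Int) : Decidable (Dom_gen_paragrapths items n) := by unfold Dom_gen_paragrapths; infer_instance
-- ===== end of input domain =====

-- B chunks by slicing (' '.join(items[j:j+n]) over range(0,len,n)) instead of A's per-word
-- counter/accumulator loop; for n <= 0 it returns one joined paragraph, as A does.

-- ===== PORT A =====
-- A's loop body: state (result, i, c); append or extend result[i], c += 1, reset when c == n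
def stepA (n : Int) (st : List String × Int × Int) (s : String) : List String × Int × Int :=
  let result := if st.2.2 = 0 then st.1 ++ [s]
                else st.1.set st.2.1.toNat ((st.1.getD st.2.1.toNat "") ++ " " ++ s)
  let c := st.2.2 + 1
  if c = n then (result, st.2.1 + 1, 0) else (result, st.2.1, c)

def gen_paragrapths (items : List String) (n : Int) : List String :=
  (items.foldl (stepA n) ([], 0, 0)).1

-- ===== PORT B =====
def gen_paragrapths_alt (items : List String) (n : Int) : List String :=
  if n ≤ 0 then (if items = [] then [] else [PySem.Str.join " " items])
  else (PySem.List.pyRange 0 (items.length : Int) n).map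
        (fun j => PySem.Str.join " " (PySem.List.slice items (some j) (some (j + n))))

-- ===== PRECONDITION & SPEC =====
def Spec_gen_paragrapths (items : List String) (n : Int) (out : List String) : Prop := out = gen_paragrapths_alt items n
instance (items : List String) (n : Int) (out : List String) : Decidable (Spec_gen_paragrapths items n out) := by unfold Spec_gen_paragrapths; infer_instance

-- ===== CLAIM (what is proved, stated in full; the proofs are below) =====
def Claim_equal_gen_paragrapths : Prop := ∀ (items : List String) (n : Int), Dom_gen_paragrapths items n → Spec_gen_paragrapths items n (gen_paragrapths items n)

-- ===== LEMMAS AND PROOFS =====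

-- ' '.join algebra
theorem join_singleton (a : String) : PySem.Str.join " " [a] = a := by
  rw [← String.toList_inj]
  simp [PySem.Str.join, PySem.Chars.join, List.intercalate]

theorem join_merge (a b : String) (l : List String) :
    PySem.Str.join " " (a :: b :: l) = PySem.Str.join " " ((a ++ " " ++ b) :: l) := by
  rw [← String.toList_inj]
  cases l <;> simp [PySem.Str.join, PySem.Chars.join, List.intercalate]

-- the list surgery A performs at the last slot
theorem getD_last (res0 : List String) (cur d : String) : (res0 ++ [cur]).getD res0.length d = cur := by
  induction res0 with
  | nil => rfl
  | cons x xs ih => simpa using ih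

theorem set_last (res0 : List String) (cur v : String) : (res0 ++ [cur]).set res0.length v = res0 ++ [v] := by
  induction res0 with
  | nil => rfl
  | cons x xs ih => simpa using ih

-- n ≤ 0: the counter never matches n again, so everything joins onto the single slot
theorem foldA_neg (n : Int) (hn : n ≤ 0) :
    ∀ (xs res0 : List String) (cur : String) (c : Int), 1 ≤ c →
      (List.foldl (stepA n) (res0 ++ [cur], (res0.length : Int), c) xs).1
        = res0 ++ [PySem.Str.join " " (cur :: xs)] := by
  intro xs
  induction xs with
  | nil => intro res0 cur c _; simp [join_singleton]
  | cons s xs ih =>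
    intro res0 cur c hc
    have h0 : ¬ (c = 0) := by omega
    have h1 : ¬ (c + 1 = n) := by omega
    simp only [List.foldl_cons, stepA, h0, if_false, Int.toNat_natCast, getD_last, set_last,
      if_neg h1]
    rw [join_merge]
    exact ih res0 (cur ++ " " ++ s) (c + 1) (by omega)

-- the meeting point of both proofs for 1 ≤ n: cur is the open paragraph, k its remaining capacity
def chunkAux (n : Int) : List String → String → Nat → List String
  | [], cur, _ => [cur]
  | s :: xs, cur, 0 => cur :: chunkAux n xs s (n - 1).toNat
  | s :: xs, cur, k + 1 => chunkAux n xs (cur ++ " " ++ s) k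

def chunk0 (n : Int) : List String → List String
  | [] => []
  | s :: xs => chunkAux n xs s (n - 1).toNat

theorem chunkAux_eq (n : Int) :
    ∀ (xs : List String) (cur : String) (k : Nat),
      chunkAux n xs cur k = PySem.Str.join " " (cur :: xs.take k) :: chunk0 n (xs.drop k) := by
  intro xs
  induction xs with
  | nil => intro cur k; simp [chunkAux, chunk0, join_singleton]
  | cons s xs ih =>
    intro cur k
    cases k with
    | zero => simp [chunkAux, chunk0, join_singleton]
    | succ k => simp only [chunkAux, List.take_succ_cons, List.drop_succ_cons, ih, join_merge]

theorem chunk0_cons (n : Int) (hn : 1 ≤ n) (s : String) (xs : List String) :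
    chunk0 n (s :: xs) = PySem.Str.join " " ((s :: xs).take n.toNat)
      :: chunk0 n ((s :: xs).drop n.toNat) := by
  have h : n.toNat = (n - 1).toNat + 1 := by omega
  rw [chunk0, chunkAux_eq, h]
  simp

-- 1 ≤ n: the A-loop computes chunk0 (fuel = length bound; the two loop-head shapes c = 0 / 1 ≤ c < n together)
theorem foldA_pos (n : Int) (hn : 1 ≤ n) :
    ∀ (L : Nat),
      (∀ (xs : List String), xs.length ≤ L → ∀ (res0 : List String) (cur : String) (c : Int),
        1 ≤ c → c < n →
        (List.foldl (stepA n) (res0 ++ [cur], (res0.length : Int), c) xs).1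
          = res0 ++ chunkAux n xs cur (n - c).toNat) ∧
      (∀ (xs : List String), xs.length ≤ L → ∀ (res0 : List String),
        (List.foldl (stepA n) (res0, (res0.length : Int), 0) xs).1 = res0 ++ chunk0 n xs) := by
  intro L
  induction L with
  | zero =>
    constructor
    · intro xs hx res0 cur c hc1 hc2
      have : xs = [] := List.length_eq_zero_iff.mp (Nat.le_zero.mp hx)
      subst this; simp [chunkAux]
    · intro xs hx res0
      have : xs = [] := List.length_eq_zero_iff.mp (Nat.le_zero.mp hx)
      subst this; simp [chunk0]
  | succ L ihL =>
    constructor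
    · intro xs hx res0 cur c hc1 hc2
      cases xs with
      | nil => simp [chunkAux]
      | cons s xs =>
        have h0 : ¬ (c = 0) := by omega
        simp only [List.foldl_cons, stepA, h0, if_false, Int.toNat_natCast, getD_last, set_last]
        by_cases hcn : c + 1 = n
        · have hk0 : (n - c).toNat = 0 + 1 := by omega
          rw [if_pos hcn, hk0]
          cases xs with
          | nil => simp [chunkAux]
          | cons t ts =>
            have hi : (res0.length : Int) + 1 = ((res0 ++ [cur ++ " " ++ s]).length : Int) := by
              simp
            rw [hi, (ihL).2 (t :: ts) (by simpa using hx) (res0 ++ [cur ++ " " ++ s])]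
            simp [chunkAux, chunk0]
        · have hk1 : (n - c).toNat = (n - (c + 1)).toNat + 1 := by omega
          rw [if_neg hcn, hk1]
          rw [(ihL).1 xs (by simpa using hx) res0 (cur ++ " " ++ s) (c + 1) (by omega) (by omega)]
          simp [chunkAux]
    · intro xs hx res0
      cases xs with
      | nil => simp [chunk0]
      | cons s xs =>
        simp only [List.foldl_cons, stepA, if_true]
        by_cases hn1 : (0 : Int) + 1 = n
        · rw [if_pos hn1]
          cases xs with
          | nil => simp [chunk0, chunkAux]
          | cons t ts =>
            have hi : (res0.length : Int) + 1 = ((res0 ++ [s]).length : Int) := by simp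
            rw [hi, (ihL).2 (t :: ts) (by simpa using hx) (res0 ++ [s])]
            have h1 : (n - 1).toNat = 0 := by omega
            simp [chunk0, chunkAux, h1]
        · rw [if_neg hn1]
          have h1 := (ihL).1 xs (by simpa using hx) res0 s 1 (by omega) (by omega)
          simp only [zero_add] at h1 ⊢
          rw [h1, chunk0]

-- pyRange peeling for a positive step
theorem pyRange_pos_cons (n b : Int) (hn : 0 < n) (hb : 0 < b) :
    PySem.List.pyRange 0 b n = 0 :: (PySem.List.pyRange 0 (b - n) n).map (· + n) := by
  rw [PySem.List.pyRange_of_pos 0 b hn, PySem.List.pyRange_of_pos 0 (b - n) hn]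
  have hC : (if (0:Int) < b then ((b - 0 + n - 1) / n).toNat else 0)
      = (if (0:Int) < b - n then ((b - n - 0 + n - 1) / n).toNat else 0) + 1 := by
    rw [if_pos hb]
    by_cases h : (0:Int) < b - n
    · rw [if_pos h]
      have e : b - 0 + n - 1 = (b - n - 0 + n - 1) + 1 * n := by ring
      rw [e, Int.add_mul_ediv_right _ _ (by omega)]
      have : 0 ≤ (b - n - 0 + n - 1) / n := Int.ediv_nonneg (by omega) (by omega)
      omega
    · rw [if_neg h]
      have e1 : 1 * n ≤ b - 0 + n - 1 := by omega
      have e2 : b - 0 + n - 1 < 2 * n := by omega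
      have : (b - 0 + n - 1) / n = 1 := by
        have := Int.ediv_emod_unique (a := b - 0 + n - 1) (b := n) (r := b - 1) (q := 1) (by omega)
        omega
      omega
  rw [hC, List.range_succ_eq_map]
  simp only [List.map_cons, List.map_map]
  refine congrArg₂ List.cons (by norm_num) ?_
  apply List.map_congr_left
  intro k _
  simp [Nat.succ_eq_add_one]
  ring

-- B's comprehension computes chunk0 (fuel induction on the list length)
theorem altB_eq_chunk0 (n : Int) (hn : 1 ≤ n) :
    ∀ (L : Nat) (items : List String), items.length ≤ L →
      (PySem.List.pyRange 0 (items.length : Int) n).map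
        (fun j => PySem.Str.join " " (PySem.List.slice items (some j) (some (j + n))))
        = chunk0 n items := by
  intro L
  induction L with
  | zero =>
    intro items hx
    have : items = [] := List.length_eq_zero_iff.mp (Nat.le_zero.mp hx)
    subst this
    simp [chunk0, PySem.List.pyRange_of_pos 0 0 (show (0:Int) < n by omega)]
  | succ L ihL =>
    intro items hx
    cases items with
    | nil =>
      simp [chunk0, PySem.List.pyRange_of_pos 0 0 (show (0:Int) < n by omega)]
    | cons s xs =>
      have hb : (0:Int) < ((s :: xs).length : Int) := by
        simp
      rw [pyRange_pos_cons n _ (by omega) hb]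
      rw [List.map_cons, List.map_map]
      rw [chunk0_cons n hn]
      have hhead : PySem.Str.join " " (PySem.List.slice (s :: xs) (some 0) (some (0 + n)))
          = PySem.Str.join " " ((s :: xs).take n.toNat) := by
        rw [PySem.List.slice_zero_start, zero_add, PySem.List.slice_to _ (by omega)]
      rw [hhead]
      congr 1
      have htail : ((s :: xs).drop n.toNat).length ≤ L := by
        simp only [List.length_drop, List.length_cons] at hx ⊢
        omega
      rw [← ihL ((s :: xs).drop n.toNat) htail]
      by_cases hle : n ≤ ((s :: xs).length : Int)
      · have hlen : (((s :: xs).drop n.toNat).length : Int) = ((s :: xs).length : Int) - n := by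
          simp only [List.length_drop]
          push_cast
          omega
        rw [hlen]
        apply List.map_congr_left
        intro j hj
        obtain ⟨hj0, _, _⟩ := (PySem.List.mem_pyRange_iff_of_pos (by omega) j).mp hj
        simp only [Function.comp_apply]
        congr 1
        rw [PySem.List.slice_toNat _ (by omega) (by omega),
            PySem.List.slice_toNat _ (by omega) (by omega), List.drop_drop]
        have e1 : n.toNat + j.toNat = (j + n).toNat := by omega
        have e2 : (j + n + n).toNat - (j + n).toNat = (j + n).toNat - j.toNat := by omega
        rw [e1, e2]
      · have h1 : PySem.List.pyRange 0 (((s :: xs).length : Int) - n) n = [] := by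
          rw [PySem.List.pyRange_of_pos _ _ (by omega)]
          rw [if_neg (by omega)]
          simp
        have h2 : (s :: xs).drop n.toNat = [] := by
          apply List.drop_eq_nil_of_le
          simp only [List.length_cons] at hle ⊢
          omega
        rw [h1, h2]
        rw [PySem.List.pyRange_of_pos _ _ (by omega)]
        simp

-- ===== VERDICT (by name: the statement is the Claim_ definition above) =====
theorem gen_paragrapths_spec : Claim_equal_gen_paragrapths := by
  intro items n _
  unfold Spec_gen_paragrapths gen_paragrapths gen_paragrapths_alt
  by_cases hn : n ≤ 0
  · rw [if_pos hn]
    cases items with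
    | nil => simp
    | cons s xs =>
      rw [if_neg (by simp)]
      simp only [List.foldl_cons, stepA, reduceIte]
      rw [if_neg (show ¬ ((0:Int) + 1 = n) by omega)]
      simpa using foldA_neg n hn xs [] s 1 (by omega)
  · rw [if_neg hn]
    have hn1 : 1 ≤ n := by omega
    rw [altB_eq_chunk0 n hn1 items.length items (le_refl _)]
    simpa using (foldA_pos n hn1 items.length).2 items (le_refl _) []
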